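-- pv_equiv track=rewrite | github.com/deenaadamjee/Deena-Adamjee_1004743824- | Lab 7/lab7.py | Kseq
-- ===== SOURCE A (Python) =====
-- def Kseq(start, stop, step):
--     """ (int,int,int) -> list of integers
--
--     Input: This function is passed start (>= 0), stop (>start), and step (>= 1) values that define a sequence of numbers.
--     Output: This function returns a list of the corresponding K sequence.
--
--     >>>Kseq(0,6,1)
--     [2, 1, 9, 100, 11881, 143544361]
--     >>>Kseq(2,6,2)
--     [9, 11881]
--     """
--
--
--
--     def K_int(n):
--         if n == 0:
--             return 2
--         if n == 1:
--             return 1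
--         else:
--             return (K_int(n-1)+K_int(n-2))**2
--
--     Kn = []
--     for n in range(start,stop,step):
--         Kn.append(K_int(n))
--
--     return (Kn)
-- ===== SOURCE B (Python) =====
-- def Kseq(start, stop, step):
--     cache = {0: 2, 1: 1}
--     def K(n):
--         if n not in cache:
--             cache[n] = (K(n - 1) + K(n - 2)) ** 2
--         return cache[n]
--     return [K(n) for n in range(start, stop, step)]
-- ===== Notes on version B (the rewrite author's own statement) =====
-- stated objective: alternative
-- what changed: Replaces the naive exponential double recursion, recomputed from scratch for each range element, by a single memoized recursion over a shared dict cache so each K value is computed once.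
import Mathlib
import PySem

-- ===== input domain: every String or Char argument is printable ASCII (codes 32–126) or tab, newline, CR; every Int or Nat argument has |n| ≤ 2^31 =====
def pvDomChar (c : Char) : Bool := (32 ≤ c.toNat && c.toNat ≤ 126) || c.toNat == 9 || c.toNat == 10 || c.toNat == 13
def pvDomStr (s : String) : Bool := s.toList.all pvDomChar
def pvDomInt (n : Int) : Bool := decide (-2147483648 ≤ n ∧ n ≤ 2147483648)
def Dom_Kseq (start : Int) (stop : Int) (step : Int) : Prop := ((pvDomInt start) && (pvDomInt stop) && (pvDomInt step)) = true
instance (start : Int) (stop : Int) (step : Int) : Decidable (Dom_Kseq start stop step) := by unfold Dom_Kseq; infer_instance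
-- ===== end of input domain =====

-- B replaces A's naive double recursion, recomputed from scratch for each range element, by a
-- single memoized recursion over a shared dict cache (each K value computed once).

-- ===== PORT A =====
-- A's helper K_int, Python's naive double recursion, literal for n ≥ 0.
-- (For n < 0 Python's K_int recurses without reaching a base case (RecursionError); such inputs
-- are outside Pre_Kseq, so the port takes the index as a Nat via .toNat at the call site.)
def KintN : Nat → Int
  | 0 => 2
  | 1 => 1
  | n + 2 => (KintN (n + 1) + KintN n) ^ 2

def Kseq (start : Int) (stop : Int) (step : Int) : List Int :=
  (PySem.List.pyRange start stop step).foldl (fun Kn n => Kn ++ [KintN n.toNat]) []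

-- ===== PORT B =====
-- B's inner K with its mutable cache, threaded as state: returns (K(n), updated cache).
-- (Same .toNat convention at the call site as port A: Python B's K recurses without reaching the
-- cached base keys for n < 0 (RecursionError), outside Pre_Kseq.  The n = 0 / n = 1 cache-miss
-- branches are unreachable — the cache always holds keys 0 and 1; Python would recurse there.)
def Kmemo : Nat → PySem.Dict Int Int → Int × PySem.Dict Int Int
  | n, cache =>
    if cache.contains (n : Int) then
      (cache.getD (n : Int) 0, cache)
    else
      match n with
      | 0 => (2, cache)
      | 1 => (1, cache)
      | m + 2 =>
        let r1 := Kmemo (m + 1) cache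
        let r2 := Kmemo m r1.2
        let v := (r1.1 + r2.1) ^ 2
        (v, r2.2.insert ((m : Int) + 2) v)

def Kseq_alt (start : Int) (stop : Int) (step : Int) : List Int :=
  let cache0 : PySem.Dict Int Int := PySem.Dict.ofList [(0, 2), (1, 1)]
  ((PySem.List.pyRange start stop step).foldl
    (fun (st : List Int × PySem.Dict Int Int) n =>
      let r := Kmemo n.toNat st.2
      (st.1 ++ [r.1], r.2))
    ([], cache0)).1

-- ===== PRECONDITION & SPEC =====
-- Pre_ excludes step = 0 (Python range raises ValueError) and ranges containing a negative index,
-- on which both Pythons' K recursions never reach a base case (RecursionError); stated in closed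
-- arithmetic form: nonempty ranges must start at ≥ 0 (step > 0) resp. have last element ≥ 0 (step < 0).
def Pre_Kseq (start : Int) (stop : Int) (step : Int) : Prop :=
  step ≠ 0 ∧
  (0 < step → (stop ≤ start ∨ 0 ≤ start)) ∧
  (step < 0 → (start ≤ stop ∨ 0 ≤ stop + 1 + PySem.Int.mod (start - stop - 1) (-step)))
instance (start : Int) (stop : Int) (step : Int) : Decidable (Pre_Kseq start stop step) := by
  unfold Pre_Kseq; infer_instance
def pvWitness_Kseq : Int × Int × Int := (0, 6, 1)

def Spec_Kseq (start : Int) (stop : Int) (step : Int) (out : List Int) : Prop := out = Kseq_alt start stop step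
instance (start : Int) (stop : Int) (step : Int) (out : List Int) : Decidable (Spec_Kseq start stop step out) := by unfold Spec_Kseq; infer_instance

-- ===== CLAIM (what is proved, stated in full; the proofs are below) =====
def Claim_equal_Kseq : Prop := ∀ (start : Int) (stop : Int) (step : Int), Dom_Kseq start stop step → Pre_Kseq start stop step → Spec_Kseq start stop step (Kseq start stop step)

-- ===== LEMMAS AND PROOFS =====

-- the cache invariant: every cached entry is a correct K value, and the base keys 0, 1 are present
def CacheOK (c : PySem.Dict Int Int) : Prop :=
  c.get? 0 = some 2 ∧ c.get? 1 = some 1 ∧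
  ∀ (m : Nat) (v : Int), c.get? (m : Int) = some v → v = KintN m

theorem Kmemo_ok (n : Nat) : ∀ (c : PySem.Dict Int Int), CacheOK c →
    (Kmemo n c).1 = KintN n ∧ CacheOK (Kmemo n c).2 := by
  induction n using Nat.strong_induction_on with
  | _ n ih =>
    intro c hc
    obtain ⟨h0, h1, hval⟩ := hc
    rw [Kmemo.eq_def]
    dsimp only
    by_cases hcont : c.contains (n : Int)
    · rw [if_pos hcont]
      obtain ⟨v, hv⟩ : ∃ v, c.get? (n : Int) = some v := by
        rw [PySem.Dict.contains_eq_isSome_get?] at hcont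
        exact Option.isSome_iff_exists.mp hcont
      exact ⟨by rw [PySem.Dict.getD_of_get?_eq_some _ _ hv]; exact hval n v hv, h0, h1, hval⟩
    · rw [if_neg hcont]
      match n, ih with
      | 0, _ =>
          exfalso
          rw [PySem.Dict.contains_eq_isSome_get?] at hcont
          simp only [Nat.cast_zero] at hcont
          rw [h0] at hcont
          exact hcont rfl
      | 1, _ =>
          exfalso
          rw [PySem.Dict.contains_eq_isSome_get?] at hcont
          simp only [Nat.cast_one] at hcont
          rw [h1] at hcont
          exact hcont rfl
      | m + 2, ih =>
          obtain ⟨ha, hca⟩ := ih (m + 1) (by omega) c ⟨h0, h1, hval⟩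
          obtain ⟨hb, hcb⟩ := ih m (by omega) _ hca
          obtain ⟨g0, g1, gval⟩ := hcb
          refine ⟨by simp only [ha, hb]; rfl, ?_, ?_, ?_⟩
          · rw [PySem.Dict.get?_insert_of_ne _ _ (by omega)]; exact g0
          · rw [PySem.Dict.get?_insert_of_ne _ _ (by omega)]; exact g1
          · intro k v hkv
            rw [PySem.Dict.get?_insert] at hkv
            split at hkv
            · rename_i heq
              have hk : k = m + 2 := by exact_mod_cast heq
              subst hk
              rw [hb] at hkv
              simp only [Option.some.injEq] at hkv
              rw [← hkv, KintN, ha]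
            · exact gval k v hkv

-- the comprehension loop: with a valid cache, each element comes out as the correct K value
theorem fold_ok (ns : List Int) : ∀ (acc : List Int) (c : PySem.Dict Int Int), CacheOK c →
    (ns.foldl
      (fun (st : List Int × PySem.Dict Int Int) n =>
        let r := Kmemo n.toNat st.2
        (st.1 ++ [r.1], r.2))
      (acc, c)).1 = acc ++ ns.map (fun n => KintN n.toNat) := by
  induction ns with
  | nil => intro acc c _; simp
  | cons n ns ih =>
      intro acc c hc
      obtain ⟨hv, hc'⟩ := Kmemo_ok n.toNat c hc
      simp only [List.foldl_cons, List.map_cons]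
      rw [hv, ih _ _ hc']
      simp

theorem cache0_ok : CacheOK (PySem.Dict.ofList [(0, 2), (1, 1)]) := by
  refine ⟨rfl, rfl, ?_⟩
  intro m v h
  rw [show PySem.Dict.ofList [((0:Int), (2:Int)), (1, 1)] =
        PySem.Dict.mk [(0, 2), (1, 1)] from rfl] at h
  rw [PySem.Dict.get?_mk_cons, PySem.Dict.get?_mk_cons] at h
  by_cases hm0 : m = 0
  · subst hm0; simp at h; simp [h.symm, KintN]
  · by_cases hm1 : m = 1
    · subst hm1; simp at h; simp [h.symm, KintN]
    · exfalso
      have e0 : ((0 : Int) == (m : Int)) = false := by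
        simp only [beq_eq_false_iff_ne]; exact_mod_cast Ne.symm hm0
      have e1 : ((1 : Int) == (m : Int)) = false := by
        simp only [beq_eq_false_iff_ne]; exact_mod_cast Ne.symm hm1
      rw [e0, e1] at h
      simp [PySem.Dict.get?] at h

-- ===== VERDICT (by name: the statement is the Claim_ definition above) =====
theorem Kseq_spec : Claim_equal_Kseq := by
  intro start stop step _ _
  unfold Spec_Kseq Kseq Kseq_alt
  rw [PySem.List.foldl_append_singleton_eq_map]
  rw [fold_ok _ _ _ cache0_ok]
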